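-- pv_equiv track=rewrite | github.com/JadedBanana/CharlesBarkley | comms_fun.py | hunger_games_generate_detect_dead
-- ===== SOURCE A (Python) =====
-- def hunger_games_generate_detect_dead(hg_dict):
--     """
--     Test for dead people.
--     """
--     everyone_dead = True
--     two_alive = False
--     for player in hg_dict['statuses']:
--         if not hg_dict['statuses'][player]['dead']:
--             if not everyone_dead:
--                 two_alive = True
--                 break
--             else:
--                 everyone_dead = False
--     return everyone_dead, two_alive
-- ===== SOURCE B (Python) =====
-- def hunger_games_generate_detect_dead(hg_dict):
--     statuses = hg_dict['statuses']
--     alive = [p for p in statuses if not statuses[p]['dead']]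
--     return len(alive) == 0, len(alive) >= 2
-- ===== Notes on version B (the rewrite author's own statement) =====
-- stated objective: simpler
-- what changed: Replaced A's two-flag early-break state machine with collect-then-measure: build the list of alive players in one comprehension and derive both booleans from its length.
import Mathlib
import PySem

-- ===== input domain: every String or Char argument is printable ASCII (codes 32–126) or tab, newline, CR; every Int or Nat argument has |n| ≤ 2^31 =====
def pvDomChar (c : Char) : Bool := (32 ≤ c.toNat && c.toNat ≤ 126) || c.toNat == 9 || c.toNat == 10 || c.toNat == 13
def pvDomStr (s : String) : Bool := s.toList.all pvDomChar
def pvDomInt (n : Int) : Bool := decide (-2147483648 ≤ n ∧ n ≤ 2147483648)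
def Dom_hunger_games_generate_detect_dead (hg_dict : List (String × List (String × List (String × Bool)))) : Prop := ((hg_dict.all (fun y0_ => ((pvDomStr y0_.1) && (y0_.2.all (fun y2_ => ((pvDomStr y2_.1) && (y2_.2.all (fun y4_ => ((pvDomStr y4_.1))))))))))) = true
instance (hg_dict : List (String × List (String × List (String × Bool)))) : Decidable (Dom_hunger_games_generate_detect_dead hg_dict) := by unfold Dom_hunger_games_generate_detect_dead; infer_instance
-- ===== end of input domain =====

-- B replaces A's two-flag early-break state machine with collect-then-measure (filter the alive
-- players, then compare the length); objective: simpler. Return-value equivalence only.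

-- ===== PORT A =====
-- "not hg_dict['statuses'][player]['dead']": the player is alive.  Missing 'dead' is a KeyError
-- in Python (excluded by Pre_); the getD default there is arbitrary.
def pvAlive (d : PySem.Dict String (List (String × Bool))) (p : String) : Bool :=
  !((PySem.Dict.ofList ((d.get? p).getD [])).getD "dead" true)

-- A's loop over the players with state (everyone_dead, two_alive); the inner 'break' is the
-- first branch returning without recursing.
def pvDetectLoop (d : PySem.Dict String (List (String × Bool))) :
    List String → Bool → Bool → Bool × Bool
  | [], ed, ta => (ed, ta)
  | p :: rest, ed, ta =>
    if pvAlive d p then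
      if !ed then (ed, true)
      else pvDetectLoop d rest false ta
    else pvDetectLoop d rest ed ta

def hunger_games_generate_detect_dead (hg_dict : List (String × List (String × List (String × Bool)))) : Bool × Bool :=
  -- hg_dict['statuses']: missing key is a KeyError, excluded by Pre_; default [] is arbitrary.
  let st := ((PySem.Dict.ofList hg_dict).get? "statuses").getD []
  let d := PySem.Dict.ofList st
  pvDetectLoop d d.keys true false

-- ===== PORT B =====
def hunger_games_generate_detect_dead_alt (hg_dict : List (String × List (String × List (String × Bool)))) : Bool × Bool :=
  let st := ((PySem.Dict.ofList hg_dict).get? "statuses").getD []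
  let d := PySem.Dict.ofList st
  let alive := d.keys.filter (fun p => pvAlive d p)
  (alive.length == 0, decide (2 ≤ alive.length))

-- ===== PRECONDITION & SPEC =====
-- Pre_: 'statuses' present and every player's record contains 'dead' (else Python raises KeyError).
-- It is slightly stronger than A's exact returning set: A's early break can return before reaching
-- a malformed record with no 'dead' key, while B (no short-circuit) raises there; such malformed
-- inputs are excluded (see claim.json cites).
def Pre_hunger_games_generate_detect_dead (hg_dict : List (String × List (String × List (String × Bool)))) : Prop :=
  (match (PySem.Dict.ofList hg_dict).get? "statuses" with
   | none => false
   | some st => (PySem.Dict.ofList st).items.all (fun p => (PySem.Dict.ofList p.2).contains "dead")) = true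
instance (hg_dict : List (String × List (String × List (String × Bool)))) : Decidable (Pre_hunger_games_generate_detect_dead hg_dict) := by unfold Pre_hunger_games_generate_detect_dead; infer_instance

def pvWitness_hunger_games_generate_detect_dead : (List (String × List (String × List (String × Bool)))) :=
  [("statuses", [("alice", [("dead", false)]), ("bob", [("dead", true)])])]

def Spec_hunger_games_generate_detect_dead (hg_dict : List (String × List (String × List (String × Bool)))) (out : Bool × Bool) : Prop := out = hunger_games_generate_detect_dead_alt hg_dict
instance (hg_dict : List (String × List (String × List (String × Bool)))) (out : Bool × Bool) : Decidable (Spec_hunger_games_generate_detect_dead hg_dict out) := by unfold Spec_hunger_games_generate_detect_dead; infer_instance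

-- ===== CLAIM (what is proved, stated in full; the proofs are below) =====
def Claim_equal_hunger_games_generate_detect_dead : Prop := ∀ (hg_dict : List (String × List (String × List (String × Bool)))), Dom_hunger_games_generate_detect_dead hg_dict → Pre_hunger_games_generate_detect_dead hg_dict → Spec_hunger_games_generate_detect_dead hg_dict (hunger_games_generate_detect_dead hg_dict)

-- ===== LEMMAS AND PROOFS =====

-- From state (everyone_dead = false, two_alive = false): result is (false, at least one alive left).
theorem pvDetectLoop_false (d : PySem.Dict String (List (String × Bool))) (l : List String) :
    pvDetectLoop d l false false = (false, decide (1 ≤ (l.filter (fun p => pvAlive d p)).length)) := by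
  induction l with
  | nil => simp [pvDetectLoop]
  | cons p rest ih =>
    by_cases h : pvAlive d p <;> simp [pvDetectLoop, h, ih]

-- From the initial state: everyone_dead = (no alive), two_alive = (at least two alive).
theorem pvDetectLoop_true (d : PySem.Dict String (List (String × Bool))) (l : List String) :
    pvDetectLoop d l true false =
      ((l.filter (fun p => pvAlive d p)).length == 0,
       decide (2 ≤ (l.filter (fun p => pvAlive d p)).length)) := by
  induction l with
  | nil => simp [pvDetectLoop]
  | cons p rest ih =>
    by_cases h : pvAlive d p
    · simp only [pvDetectLoop, h, if_pos, List.filter_cons_of_pos h, pvDetectLoop_false]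
      simp [Nat.succ_le_succ_iff]
    · simp [pvDetectLoop, h, ih]

-- ===== VERDICT (by name: the statement is the Claim_ definition above) =====
theorem hunger_games_generate_detect_dead_spec : Claim_equal_hunger_games_generate_detect_dead := by
  intro hg_dict _ _
  unfold Spec_hunger_games_generate_detect_dead
  unfold hunger_games_generate_detect_dead hunger_games_generate_detect_dead_alt
  simp [pvDetectLoop_true]
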